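-- pv_equiv track=rewrite | github.com/MirceaAndrei/BioInformatics | PROJECT_L7/EX2.py | find_tandem_repeats
-- ===== SOURCE A (Python) =====
-- from collections import defaultdict
--
-- def find_tandem_repeats(sequence, min_len=3, max_len=6):
--
--     all_repeats = defaultdict(lambda: defaultdict(list))
--     if not sequence:
--         return all_repeats
--
--     seq_len = len(sequence)
--
--
--     for k in range(min_len, max_len + 1):
--
--         for i in range(seq_len - k + 1):
--             motif = sequence[i:i + k]
--             next_start_index = i + k
--
--
--             if next_start_index + k <= seq_len:
--                 next_motif = sequence[next_start_index:next_start_index + k]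
--
--                 if motif == next_motif:
--                     repeat_count = 2
--                     current_end = next_start_index + k
--
--
--                     while current_end + k <= seq_len and sequence[current_end:current_end + k] == motif:
--                         repeat_count += 1
--                         current_end += k
--
--                     start_index = i
--
--
--                     last_end_index = all_repeats[k][motif][-1][0] + k * all_repeats[k][motif][-1][1] - 1 if all_repeats[k][motif] else -1
--
--                     if start_index > last_end_index:
--                         all_repeats[k][motif].append((start_index, repeat_count))
--
--     return all_repeats
-- ===== SOURCE B (Python) =====
-- from collections import defaultdict
--
-- def find_tandem_repeats(sequence, min_len=3, max_len=6):
--     # Per period k: one linear pass over a match array (sequence[i] == sequence[i+k])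
--     # instead of repeated O(k) slice comparisons at every position.
--     out = defaultdict(lambda: defaultdict(list))
--     n = len(sequence)
--     if not sequence:
--         return out
--     for k in range(min_len, max_len + 1):
--         if k < 1:
--             continue  # a period length below 1 is meaningless
--         # run[i] = number of consecutive positions j >= i with sequence[j] == sequence[j + k]
--         run = [0] * (n + 1)
--         for i in range(n - k - 1, -1, -1):
--             run[i] = run[i + 1] + 1 if sequence[i] == sequence[i + k] else 0
--         for i in range(n - 2 * k + 1):
--             if run[i] >= k:
--                 lst = out[k][sequence[i:i + k]]
--                 last_end = lst[-1][0] + k * lst[-1][1] - 1 if lst else -1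
--                 if i > last_end:
--                     lst.append((i, 1 + run[i] // k))
--     return out
-- ===== Notes on version B (the rewrite author's own statement) =====
-- stated objective: faster
-- what changed: Per period k, B makes one linear pass building a run-length array of positions where sequence[i]==sequence[i+k] and derives each repeat count by a single division, instead of A's per-position O(k) slice comparison plus an inner while loop re-slicing the string.
-- outside the precondition, e.g. on find_tandem_repeats('abc', -1, -1): A returns {-1: {'': [(2, 2), (3, 3), (4, 4)]}}, B returns {}
import Mathlib
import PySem

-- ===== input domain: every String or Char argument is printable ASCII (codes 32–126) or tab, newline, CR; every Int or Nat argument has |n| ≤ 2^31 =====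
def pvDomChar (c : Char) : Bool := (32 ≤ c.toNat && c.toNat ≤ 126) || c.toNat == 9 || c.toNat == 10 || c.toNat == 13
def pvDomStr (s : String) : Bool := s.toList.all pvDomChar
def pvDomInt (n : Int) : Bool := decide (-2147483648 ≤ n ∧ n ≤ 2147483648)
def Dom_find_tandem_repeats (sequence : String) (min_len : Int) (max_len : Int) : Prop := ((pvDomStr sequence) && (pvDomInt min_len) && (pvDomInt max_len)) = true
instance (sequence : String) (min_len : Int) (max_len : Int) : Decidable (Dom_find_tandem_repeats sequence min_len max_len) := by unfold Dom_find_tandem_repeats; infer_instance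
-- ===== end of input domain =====

-- B replaces A's per-position slice comparisons and re-slicing while loop by one linear
-- run-length pass per period k; measured asymptotically faster. Pre_ excludes non-positive
-- period lengths, where A loops forever (k = 0) or returns accidental empty-motif entries (k < 0).


-- Nested-dict helpers shared by both ports (both Pythons use the same
-- defaultdict(lambda: defaultdict(list)) mechanics: look up d[k][motif], append to it).
-- An access that appends creates missing keys at the end (defaultdict); an access that does
-- not append only ever happens on an already-present key (the non-empty-list case), so the
-- association lists below model the defaultdicts exactly.
def pvGetInner (dd : List (String × List (Int × Int))) (m : String) : List (Int × Int) :=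
  match dd with
  | [] => []
  | (m', l) :: rest => if m' = m then l else pvGetInner rest m

def pvGet2 (d : List (Int × List (String × List (Int × Int)))) (k : Int) (m : String) : List (Int × Int) :=
  match d with
  | [] => []
  | (k', dd) :: rest => if k' = k then pvGetInner dd m else pvGet2 rest k m

def pvAppInner (dd : List (String × List (Int × Int))) (m : String) (p : Int × Int) : List (String × List (Int × Int)) :=
  match dd with
  | [] => [(m, [p])]
  | (m', l) :: rest => if m' = m then (m', l ++ [p]) :: rest else (m', l) :: pvAppInner rest m p

def pvApp2 (d : List (Int × List (String × List (Int × Int)))) (k : Int) (m : String) (p : Int × Int) : List (Int × List (String × List (Int × Int))) :=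
  match d with
  | [] => [(k, [(m, [p])])]
  | (k', dd) :: rest => if k' = k then (k', pvAppInner dd m p) :: rest else (k', dd) :: pvApp2 rest k m p

-- ===== PORT A =====
-- the inner 'while' of A, with fuel (A diverges for k ≤ 0; for k ≥ 1 the fuel is never exhausted)
def pvWhileA (s : List Char) (k : Int) (motif : List Char) : Nat → Int → Int → Int × Int
  | 0, cnt, ce => (cnt, ce)
  | fuel + 1, cnt, ce =>
    if ce + k ≤ (s.length : Int) ∧ PySem.List.slice s (some ce) (some (ce + k)) = motif then
      pvWhileA s k motif fuel (cnt + 1) (ce + k)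
    else (cnt, ce)

def find_tandem_repeats (sequence : String) (min_len : Int) (max_len : Int) : List (Int × List (String × List (Int × Int))) :=
  let s := sequence.toList
  if s = [] then [] else
  let n : Int := s.length
  (PySem.List.pyRange min_len (max_len + 1) 1).foldl (fun d k =>
    (PySem.List.pyRange 0 (n - k + 1) 1).foldl (fun d i =>
      let motif := PySem.List.slice s (some i) (some (i + k))
      let ns := i + k
      if ns + k ≤ n then
        if motif = PySem.List.slice s (some ns) (some (ns + k)) then
          let r := pvWhileA s k motif (s.length + 1) 2 (ns + k)
          let lst := pvGet2 d k (String.ofList motif)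
          let lastEnd : Int :=
            if lst = [] then -1
            else (PySem.List.pyGetD lst (-1) (0, 0)).1 + k * (PySem.List.pyGetD lst (-1) (0, 0)).2 - 1
          if i > lastEnd then pvApp2 d k (String.ofList motif) (i, r.1) else d
        else d
      else d) d) []

-- ===== PORT B =====
def find_tandem_repeats_alt (sequence : String) (min_len : Int) (max_len : Int) : List (Int × List (String × List (Int × Int))) :=
  let s := sequence.toList
  if s = [] then [] else
  let n : Int := s.length
  (PySem.List.pyRange min_len (max_len + 1) 1).foldl (fun d k =>
    if k < 1 then d else
    -- run[i] = number of consecutive positions j ≥ i with s[j] == s[j+k]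
    let run : List Int :=
      (PySem.List.pyRange (n - k - 1) (-1) (-1)).foldl
        (fun acc i =>
          (if PySem.List.pyGetD s i ' ' = PySem.List.pyGetD s (i + k) ' ' then acc.headD 0 + 1 else 0) :: acc)
        (List.replicate (min (n + 1) (k + 1)).toNat 0)
    (PySem.List.pyRange 0 (n - 2 * k + 1) 1).foldl (fun d i =>
      let r := PySem.List.pyGetD run i 0
      if r ≥ k then
        let motif := PySem.List.slice s (some i) (some (i + k))
        let lst := pvGet2 d k (String.ofList motif)
        let lastEnd : Int :=
          if lst = [] then -1
          else (PySem.List.pyGetD lst (-1) (0, 0)).1 + k * (PySem.List.pyGetD lst (-1) (0, 0)).2 - 1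
        if i > lastEnd then pvApp2 d k (String.ofList motif) (i, 1 + PySem.Int.floordiv r k) else d
      else d) d) []

-- ===== PRECONDITION & SPEC =====
-- Pre_ excludes non-positive period lengths (min_len ≤ 0 actually reached, i.e. nonempty
-- sequence and min_len ≤ max_len): there A loops forever at k = 0, and for a negative-only
-- range returns accidental empty-motif entries produced by negative-slice wraparound.
def Pre_find_tandem_repeats (sequence : String) (min_len : Int) (max_len : Int) : Prop :=
  sequence = "" ∨ max_len < min_len ∨ 1 ≤ min_len
instance (sequence : String) (min_len : Int) (max_len : Int) : Decidable (Pre_find_tandem_repeats sequence min_len max_len) := by unfold Pre_find_tandem_repeats; infer_instance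

def pvWitness_find_tandem_repeats : String × Int × Int := ("abcabcab", 3, 6)

def Spec_find_tandem_repeats (sequence : String) (min_len : Int) (max_len : Int) (out : List (Int × List (String × List (Int × Int)))) : Prop := out = find_tandem_repeats_alt sequence min_len max_len
instance (sequence : String) (min_len : Int) (max_len : Int) (out : List (Int × List (String × List (Int × Int)))) : Decidable (Spec_find_tandem_repeats sequence min_len max_len out) := by unfold Spec_find_tandem_repeats; infer_instance

-- ===== CLAIM (what is proved, stated in full; the proofs are below) =====
def Claim_equal_find_tandem_repeats : Prop := ∀ (sequence : String) (min_len : Int) (max_len : Int), Dom_find_tandem_repeats sequence min_len max_len → Pre_find_tandem_repeats sequence min_len max_len → Spec_find_tandem_repeats sequence min_len max_len (find_tandem_repeats sequence min_len max_len)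

-- ===== LEMMAS AND PROOFS =====

-- run length of consecutive matches s[j] == s[j+kk] starting at i
def pvR (s : List Char) (kk : Nat) (i : Nat) : Nat :=
  if h : i + kk < s.length ∧ s[i]? = s[i + kk]? then pvR s kk (i + 1) + 1 else 0
termination_by s.length - i
decreasing_by omega

def pvM (s : List Char) (kk j : Nat) : Prop :=
  j + kk < s.length ∧ s[j]? = s[j + kk]?

theorem pvR_ge_iff (s : List Char) (kk : Nat) :
    ∀ (j i : Nat), j ≤ pvR s kk i ↔ ∀ p < j, pvM s kk (i + p) := by
  intro j
  induction j with
  | zero => intro i; simp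
  | succ j ih =>
    intro i
    rw [pvR]
    by_cases h : i + kk < s.length ∧ s[i]? = s[i + kk]?
    · rw [dif_pos h]
      have hsplit : (j + 1 ≤ pvR s kk (i + 1) + 1) ↔ j ≤ pvR s kk (i + 1) := by omega
      rw [hsplit, ih]
      constructor
      · intro hall p hp
        match p with
        | 0 => exact h
        | Nat.succ q =>
          rw [show i + q.succ = i + 1 + q from by omega]
          exact hall q (by omega)
      · intro hall p hp
        rw [show i + 1 + p = i + (p + 1) from by omega]
        exact hall (p + 1) (by omega)
    · rw [dif_neg h]
      constructor
      · intro hle; omega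
      · intro hall
        exact absurd (show pvM s kk (i + 0) from hall 0 (by omega)) (by simpa [pvM] using h)

theorem pvR_bound (s : List Char) (kk : Nat) (i : Nat) (h : 0 < pvR s kk i) :
    i + pvR s kk i + kk ≤ s.length := by
  have := (pvR_ge_iff s kk (pvR s kk i) i).mp le_rfl (pvR s kk i - 1) (by omega)
  have := this.1
  omega

-- adjacent block equality from pointwise matches
theorem pvBlockEq_of (s : List Char) (kk a : Nat) (hb : a + 2 * kk ≤ s.length)
    (h : ∀ p < kk, s[a + p]? = s[a + kk + p]?) :
    (s.drop a).take kk = (s.drop (a + kk)).take kk := by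
  apply List.ext_getElem
  · simp; omega
  · intro p h1 h2
    have hp : p < kk := by simp at h1; omega
    have hx := h p hp
    rw [List.getElem?_eq_getElem (show a + p < s.length by omega),
        List.getElem?_eq_getElem (show a + kk + p < s.length by omega)] at hx
    have hx' := Option.some.inj hx
    simp only [List.getElem_take, List.getElem_drop]
    exact hx'

theorem pvCharEq_of_blockEq (s : List Char) (kk a : Nat) (_hb : a + 2 * kk ≤ s.length)
    (h : (s.drop a).take kk = (s.drop (a + kk)).take kk) :
    ∀ p < kk, s[a + p]? = s[a + kk + p]? := by
  intro p hp
  have h' := congrArg (fun l => l[p]?) h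
  simp only [List.getElem?_take, List.getElem?_drop, hp, if_pos] at h'
  exact h'

-- block equality chain: every block along the run equals block 0
theorem pvChain (s : List Char) (kk : Nat) (hk : 1 ≤ kk) (i : Nat) :
    ∀ T, T * kk ≤ pvR s kk i → (s.drop (i + T * kk)).take kk = (s.drop i).take kk := by
  intro T
  induction T with
  | zero => intro _; simp
  | succ T ih =>
    intro hT
    have e : (T + 1) * kk = T * kk + kk := by ring
    have hT' : T * kk ≤ pvR s kk i := by omega
    have hall := (pvR_ge_iff s kk ((T + 1) * kk) i).mp hT
    have hpos : 1 ≤ (T + 1) * kk := by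
      have := Nat.mul_pos (Nat.succ_pos T) (show 0 < kk by omega); omega
    have hb : i + (T + 1) * kk + kk ≤ s.length := by
      have := (hall ((T + 1) * kk - 1) (by omega)).1
      omega
    have hadj : (s.drop (i + T * kk)).take kk = (s.drop (i + T * kk + kk)).take kk := by
      apply pvBlockEq_of s kk (i + T * kk) (by omega)
      intro p hp
      have hm := hall (T * kk + p) (by omega)
      rw [show i + (T * kk + p) = i + T * kk + p from by omega] at hm
      rw [show i + T * kk + kk + p = i + T * kk + p + kk from by omega]
      exact hm.2
    have e4 : i + (T + 1) * kk = i + T * kk + kk := by omega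
    rw [e4, ← hadj]
    exact ih hT'

-- the while loop of A computes 1 + pvR/kk repeats
theorem pvWhileA_run (s : List Char) (kk : Nat) (hk : 1 ≤ kk) (ii : Nat)
    (hR : kk ≤ pvR s kk ii) :
    ∀ (fuel : Nat) (T : Nat), 2 ≤ T → T ≤ pvR s kk ii / kk + 1 → pvR s kk ii / kk + 1 - T < fuel →
      pvWhileA s (kk : Int) ((s.drop ii).take kk) fuel (T : Int) ((ii : Int) + (T : Int) * (kk : Int)) =
        (((pvR s kk ii / kk + 1 : Nat) : Int), ((ii : Int) + ((pvR s kk ii / kk + 1 : Nat) : Int) * (kk : Int))) := by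
  have hr0 : 0 < pvR s kk ii := by omega
  have hbnd := pvR_bound s kk ii hr0
  have hm : pvR s kk ii % kk < kk := Nat.mod_lt _ (by omega)
  have hqm : pvR s kk ii = pvR s kk ii / kk * kk + pvR s kk ii % kk := by
    rw [Nat.mul_comm]; exact (Nat.div_add_mod _ kk).symm
  set q := pvR s kk ii / kk with hq
  set m := pvR s kk ii % kk with hmdef
  have hA : (q + 1) * kk = q * kk + kk := by ring
  have hB : (q + 2) * kk = q * kk + 2 * kk := by ring
  have hq1 : 1 ≤ q := by
    rcases Nat.eq_zero_or_pos q with h0 | h1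
    · rw [h0] at hqm; simp at hqm; omega
    · exact h1
  have hCbound : ii + (q + 1) * kk ≤ s.length := by omega
  have hrC : pvR s kk ii < (q + 1) * kk := by omega
  have hfail : ¬(ii + (q + 2) * kk ≤ s.length ∧
      (s.drop (ii + (q + 1) * kk)).take kk = (s.drop ii).take kk) := by
    rintro ⟨hb', heq⟩
    have hchain := pvChain s kk hk ii q (by omega)
    have hblock : (s.drop (ii + q * kk)).take kk =
        (s.drop (ii + q * kk + kk)).take kk := by
      rw [show ii + q * kk + kk = ii + (q + 1) * kk from by omega]
      rw [hchain, heq]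
    have hchars := pvCharEq_of_blockEq s kk (ii + q * kk) (by omega) hblock
    have hge : (q + 1) * kk ≤ pvR s kk ii := by
      rw [pvR_ge_iff]
      intro p hp
      by_cases hplo : p < q * kk
      · exact (pvR_ge_iff s kk (q * kk) ii).mp (by omega) p hplo
      · constructor
        · omega
        · have hq' : p - q * kk < kk := by omega
          have := hchars (p - q * kk) hq'
          rw [show ii + q * kk + (p - q * kk) = ii + p from by omega,
              show ii + q * kk + kk + (p - q * kk) = ii + p + kk from by omega] at this
          exact this
    omega
  intro fuel
  induction fuel with
  | zero => intro T h2 hTC hf; omega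
  | succ fuel ih =>
    intro T h2 hTC hf
    rw [pvWhileA]
    rw [show (ii : Int) + (T : Int) * (kk : Int) = ((ii + T * kk : Nat) : Int) from by push_cast; ring]
    rw [show ((ii + T * kk : Nat) : Int) + (kk : Int) = (((ii + T * kk) + kk : Nat) : Int) from by push_cast; ring]
    rw [show PySem.List.slice s (some ((ii + T * kk : Nat) : Int)) (some (((ii + T * kk) + kk : Nat) : Int)) =
          (s.drop (ii + T * kk)).take kk from by
        rw [show (((ii + T * kk) + kk : Nat) : Int) = ((ii + T * kk : Nat) : Int) + ((kk : Nat) : Int) from by push_cast; ring]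
        exact PySem.List.slice_natCast_add s (ii + T * kk) kk]
    by_cases hT : T < q + 1
    · have hmul : (T + 1) * kk ≤ (q + 1) * kk := Nat.mul_le_mul_right kk (by omega)
      have hTq : T * kk ≤ q * kk := Nat.mul_le_mul_right kk (by omega)
      have hTk : T * kk ≤ pvR s kk ii := by omega
      rw [if_pos ⟨by
            have h1 : (T + 1) * kk = T * kk + kk := by ring
            have h2 : ii + T * kk + kk ≤ s.length := by omega
            exact_mod_cast h2,
          pvChain s kk hk ii T hTk⟩]
      rw [show ((T : Int) + 1) = ((T + 1 : Nat) : Int) from by push_cast; ring]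
      rw [show (((ii + T * kk) + kk : Nat) : Int) = (ii : Int) + ((T + 1 : Nat) : Int) * (kk : Int) from by push_cast; ring]
      exact ih (T + 1) (by omega) (by omega) (by omega)
    · have hTC' : T = q + 1 := by omega
      rw [if_neg (by
        rintro ⟨h1, h2⟩
        apply hfail
        constructor
        · have h1' : ii + T * kk + kk ≤ s.length := by exact_mod_cast h1
          rw [hTC'] at h1'
          have hC2 : (q + 2) * kk = (q + 1) * kk + kk := by ring
          omega
        · rw [← hTC']; exact h2)]
      subst hTC'
      push_cast
      ring_nf

-- the backwards loop of B builds exactly the table of pvR values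
theorem pvRunFold (s : List Char) (kk : Nat) (hk : 1 ≤ kk) :
    (PySem.List.pyRange ((s.length : Int) - (kk : Int) - 1) (-1) (-1)).foldl
        (fun acc i =>
          (if PySem.List.pyGetD s i ' ' = PySem.List.pyGetD s (i + (kk : Int)) ' ' then acc.headD 0 + 1 else 0) :: acc)
        (List.replicate (min ((s.length : Int) + 1) ((kk : Int) + 1)).toNat 0)
      = (List.range (s.length + 1)).map (fun t => (pvR s kk t : Int)) := by
  have hzero : ∀ t, s.length ≤ t + kk → pvR s kk t = 0 := by
    intro t ht
    rw [pvR, dif_neg]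
    rintro ⟨h1, _⟩
    omega
  by_cases hkn : s.length ≤ kk
  · rw [PySem.List.pyRange_neg_one_eq_nil (by omega)]
    rw [show (min ((s.length : Int) + 1) ((kk : Int) + 1)).toNat = s.length + 1 from by
      rw [min_eq_left (by omega)]; omega]
    rw [List.foldl_nil]
    symm
    rw [List.eq_replicate_iff]
    refine ⟨by simp, ?_⟩
    intro b hb
    simp only [List.mem_map, List.mem_range] at hb
    obtain ⟨t, _, rfl⟩ := hb
    rw [hzero t (by omega)]
    rfl
  · replace hkn : kk < s.length := by omega
    have aux : ∀ j, j ≤ s.length - kk →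
        (PySem.List.pyRange ((j : Nat) - 1) (-1) (-1)).foldl
            (fun acc i =>
              (if PySem.List.pyGetD s i ' ' = PySem.List.pyGetD s (i + (kk : Int)) ' ' then acc.headD 0 + 1 else 0) :: acc)
            ((List.range (s.length + 1 - j)).map (fun t => (pvR s kk (j + t) : Int)))
          = (List.range (s.length + 1)).map (fun t => (pvR s kk t : Int)) := by
      intro j
      induction j with
      | zero =>
        intro _
        rw [show ((0 : Nat) : Int) - 1 = -1 from by norm_num]
        rw [PySem.List.pyRange_neg_one_eq_nil le_rfl]
        simp
      | succ j ih =>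
        intro hj
        rw [show ((j + 1 : Nat) : Int) - 1 = ((j : Nat) : Int) from by push_cast; ring]
        rw [PySem.List.pyRange_neg_one_cons (by omega)]
        rw [List.foldl_cons]
        have hjb : j + kk < s.length := by omega
        have hlen : s.length + 1 - (j + 1) = (s.length - (j + 1)) + 1 := by omega
        have hhead : ((List.range (s.length + 1 - (j + 1))).map (fun t => (pvR s kk (j + 1 + t) : Int))).headD 0
            = (pvR s kk (j + 1) : Int) := by
          rw [hlen, List.range_succ_eq_map]
          simp
        have hstep :
            (if PySem.List.pyGetD s ((j : Nat) : Int) ' ' = PySem.List.pyGetD s (((j : Nat) : Int) + (kk : Int)) ' '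
              then ((List.range (s.length + 1 - (j + 1))).map (fun t => (pvR s kk (j + 1 + t) : Int))).headD 0 + 1 else 0)
                :: (List.range (s.length + 1 - (j + 1))).map (fun t => (pvR s kk (j + 1 + t) : Int))
            = (List.range (s.length + 1 - j)).map (fun t => (pvR s kk (j + t) : Int)) := by
          have hcond : (PySem.List.pyGetD s ((j : Nat) : Int) ' ' = PySem.List.pyGetD s (((j : Nat) : Int) + (kk : Int)) ' ')
              ↔ s[j]? = s[j + kk]? := by
            rw [show ((j : Nat) : Int) + (kk : Int) = ((j + kk : Nat) : Int) from by push_cast; ring]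
            rw [PySem.List.pyGetD_natCast, PySem.List.pyGetD_natCast]
            rw [List.getD_eq_getElem s ' ' (show j < s.length by omega),
                List.getD_eq_getElem s ' ' hjb]
            rw [List.getElem?_eq_getElem (show j < s.length by omega),
                List.getElem?_eq_getElem hjb]
            exact ⟨fun h => by rw [h], fun h => Option.some.inj h⟩
          have htail : (List.range (s.length + 1 - j)).map (fun t => (pvR s kk (j + t) : Int))
              = (pvR s kk j : Int) ::
                (List.range (s.length + 1 - (j + 1))).map (fun t => (pvR s kk (j + 1 + t) : Int)) := by
            rw [show s.length + 1 - j = (s.length + 1 - (j + 1)) + 1 from by omega]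
            rw [List.range_succ_eq_map]
            simp only [List.map_cons, List.map_map]
            refine List.cons_eq_cons.mpr ⟨by norm_num, ?_⟩
            apply List.map_congr_left
            intro a _
            simp only [Function.comp_apply]
            rw [show j + (a + 1) = j + 1 + a from by omega]
          rw [htail, hhead]
          congr 1
          by_cases hc : s[j]? = s[j + kk]?
          · rw [if_pos (hcond.mpr hc)]
            rw [show pvR s kk j = pvR s kk (j + 1) + 1 from by rw [pvR, dif_pos ⟨hjb, hc⟩]]
            push_cast; ring
          · rw [if_neg (fun h => hc (hcond.mp h))]
            rw [show pvR s kk j = 0 from by rw [pvR, dif_neg (fun h => hc h.2)]]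
            rfl
        rw [hstep]
        exact ih (by omega)
    have hstart : ((s.length : Int) - (kk : Int) - 1) = ((s.length - kk : Nat) : Int) - 1 := by
      push_cast [Nat.cast_sub (le_of_lt hkn)]; ring
    have hinit : (List.replicate (min ((s.length : Int) + 1) ((kk : Int) + 1)).toNat 0 : List Int)
        = (List.range (s.length + 1 - (s.length - kk))).map (fun t => (pvR s kk (s.length - kk + t) : Int)) := by
      rw [show (min ((s.length : Int) + 1) ((kk : Int) + 1)).toNat = kk + 1 from by
        rw [min_eq_right (by omega)]; omega]
      symm
      rw [List.eq_replicate_iff]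
      refine ⟨by simp; omega, ?_⟩
      intro b hb
      simp only [List.mem_map, List.mem_range] at hb
      obtain ⟨t, _, rfl⟩ := hb
      rw [hzero (s.length - kk + t) (by omega)]
      rfl
    rw [hstart, hinit]
    exact aux (s.length - kk) le_rfl

theorem pvGetMapRange (f : Nat → Int) (nq ii : Nat) (h : ii < nq) :
    ((List.range nq).map f).getD ii 0 = f ii := by
  rw [List.getD_eq_getElem _ _ (by simpa using h)]
  simp

-- the slice comparison of A per position is exactly the run-length test of B
theorem pvMatchIff (s : List Char) (kk ii : Nat) (_hk : 1 ≤ kk) (hb : ii + 2 * kk ≤ s.length) :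
    (s.drop ii).take kk = (s.drop (ii + kk)).take kk ↔ kk ≤ pvR s kk ii := by
  constructor
  · intro h
    have hchars := pvCharEq_of_blockEq s kk ii hb h
    rw [pvR_ge_iff]
    intro p hp
    constructor
    · omega
    · have := hchars p hp
      rw [show ii + kk + p = ii + p + kk from by omega] at this
      exact this
  · intro h
    apply pvBlockEq_of s kk ii hb
    intro p hp
    have := (pvR_ge_iff s kk kk ii).mp h p hp
    rw [show ii + kk + p = ii + p + kk from by omega]
    exact this.2

theorem pvWhileA_start (s : List Char) (kk : Nat) (hk : 1 ≤ kk) (ii : Nat)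
    (hm : kk ≤ pvR s kk ii) :
    pvWhileA s (kk : Int) ((s.drop ii).take kk) (s.length + 1) 2 (((ii : Int) + (kk : Int)) + (kk : Int)) =
      (((pvR s kk ii / kk + 1 : Nat) : Int), ((ii : Int) + ((pvR s kk ii / kk + 1 : Nat) : Int) * (kk : Int))) := by
  have hr0 : 0 < pvR s kk ii := by omega
  have hbnd := pvR_bound s kk ii hr0
  have hd1 : 1 ≤ pvR s kk ii / kk := (Nat.one_le_div_iff (by omega)).mpr hm
  have hds : pvR s kk ii / kk ≤ pvR s kk ii := Nat.div_le_self _ _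
  have := pvWhileA_run s kk hk ii hm (s.length + 1) 2 le_rfl (by omega) (by omega)
  rw [show ((2 : Nat) : Int) = (2 : Int) from by norm_num] at this
  rw [show (((ii : Int) + (kk : Int)) + (kk : Int)) = (ii : Int) + (2 : Int) * (kk : Int) from by ring]
  exact this

-- positions with i + 2k > n are no-ops for A
theorem pvANoop (s : List Char) (kk : Nat) (lo hi : Int)
    (hlo : (s.length : Int) - 2 * (kk : Int) < lo)
    (d : List (Int × List (String × List (Int × Int)))) :
    (PySem.List.pyRange lo hi 1).foldl (fun d i =>
      let motif := PySem.List.slice s (some i) (some (i + (kk : Int)))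
      let ns := i + (kk : Int)
      if ns + (kk : Int) ≤ ((s.length : Int)) then
        if motif = PySem.List.slice s (some ns) (some (ns + (kk : Int))) then
          let r := pvWhileA s (kk : Int) motif (s.length + 1) 2 (ns + (kk : Int))
          let lst := pvGet2 d (kk : Int) (String.ofList motif)
          let lastEnd : Int :=
            if lst = [] then -1
            else (PySem.List.pyGetD lst (-1) (0, 0)).1 + (kk : Int) * (PySem.List.pyGetD lst (-1) (0, 0)).2 - 1
          if i > lastEnd then pvApp2 d (kk : Int) (String.ofList motif) (i, r.1) else d
        else d
      else d) d = d := by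
  trans ((PySem.List.pyRange lo hi 1).foldl
    (fun (acc : List (Int × List (String × List (Int × Int)))) (_ : Int) => acc) d)
  · apply PySem.List.foldl_congr_mem
    intro acc i hi
    have hmem := PySem.List.mem_pyRange_one.mp hi
    dsimp only
    rw [if_neg (by omega)]
  · exact PySem.List.foldl_ignore _ _

-- the per-period bodies of A and B agree
theorem pvPerK (s : List Char) (k : Int) (hk : 1 ≤ k)
    (d : List (Int × List (String × List (Int × Int)))) :
    (PySem.List.pyRange 0 ((s.length : Int) - k + 1) 1).foldl (fun d i =>
      let motif := PySem.List.slice s (some i) (some (i + k))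
      let ns := i + k
      if ns + k ≤ ((s.length : Int)) then
        if motif = PySem.List.slice s (some ns) (some (ns + k)) then
          let r := pvWhileA s k motif (s.length + 1) 2 (ns + k)
          let lst := pvGet2 d k (String.ofList motif)
          let lastEnd : Int :=
            if lst = [] then -1
            else (PySem.List.pyGetD lst (-1) (0, 0)).1 + k * (PySem.List.pyGetD lst (-1) (0, 0)).2 - 1
          if i > lastEnd then pvApp2 d k (String.ofList motif) (i, r.1) else d
        else d
      else d) d
    = (if k < 1 then d else
      let run : List Int :=
        (PySem.List.pyRange ((s.length : Int) - k - 1) (-1) (-1)).foldl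
          (fun acc i =>
            (if PySem.List.pyGetD s i ' ' = PySem.List.pyGetD s (i + k) ' ' then acc.headD 0 + 1 else 0) :: acc)
          (List.replicate (min ((s.length : Int) + 1) (k + 1)).toNat 0)
      (PySem.List.pyRange 0 ((s.length : Int) - 2 * k + 1) 1).foldl (fun d i =>
        let r := PySem.List.pyGetD run i 0
        if r ≥ k then
          let motif := PySem.List.slice s (some i) (some (i + k))
          let lst := pvGet2 d k (String.ofList motif)
          let lastEnd : Int :=
            if lst = [] then -1
            else (PySem.List.pyGetD lst (-1) (0, 0)).1 + k * (PySem.List.pyGetD lst (-1) (0, 0)).2 - 1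
          if i > lastEnd then pvApp2 d k (String.ofList motif) (i, 1 + PySem.Int.floordiv r k) else d
        else d) d) := by
  rw [if_neg (by omega : ¬ k < 1)]
  have hkc : k = ((k.toNat : Nat) : Int) := by omega
  set kk := k.toNat with hkkdef
  rw [hkc]
  have hkk : 1 ≤ kk := by omega
  rw [pvRunFold s kk hkk]
  by_cases hnk : (s.length : Int) - 2 * (kk : Int) + 1 ≤ 0
  · rw [PySem.List.pyRange_one_eq_nil hnk, List.foldl_nil]
    exact pvANoop s kk 0 ((s.length : Int) - (kk : Int) + 1) (by omega) d
  · replace hnk : 0 < (s.length : Int) - 2 * (kk : Int) + 1 := by omega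
    rw [PySem.List.pyRange_one_append 0 ((s.length : Int) - 2 * (kk : Int) + 1)
          ((s.length : Int) - (kk : Int) + 1) (by omega) (by omega),
        List.foldl_append]
    rw [pvANoop s kk ((s.length : Int) - 2 * (kk : Int) + 1) ((s.length : Int) - (kk : Int) + 1) (by omega)]
    apply PySem.List.foldl_congr_mem
    intro acc i hi
    have hmem := PySem.List.mem_pyRange_one.mp hi
    obtain ⟨ii, rfl⟩ : ∃ t : Nat, i = (t : Int) := ⟨i.toNat, by omega⟩
    have hib : ii + 2 * kk ≤ s.length := by omega
    dsimp only
    rw [if_pos (by omega : ((ii : Int)) + (kk : Int) + (kk : Int) ≤ ((s.length : Int)))]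
    rw [PySem.List.slice_natCast_add s ii kk]
    rw [show ((ii : Int)) + (kk : Int) = (((ii + kk : Nat) : Nat) : Int) from by push_cast; ring]
    rw [PySem.List.slice_natCast_add s (ii + kk) kk]
    rw [PySem.List.pyGetD_natCast, pvGetMapRange _ _ ii (by omega)]
    by_cases hm : kk ≤ pvR s kk ii
    · rw [if_pos ((pvMatchIff s kk ii hkk hib).mpr hm)]
      rw [if_pos (by exact_mod_cast hm : ((pvR s kk ii : Nat) : Int) ≥ (kk : Int))]
      rw [show (((ii + kk : Nat) : Nat) : Int) + (kk : Int) = (((ii : Int)) + (kk : Int)) + (kk : Int) from by push_cast; ring]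
      rw [pvWhileA_start s kk hkk ii hm]
      rw [PySem.Int.floordiv_natCast (pvR s kk ii) kk]
      dsimp only
      rw [show (1 : Int) + ((pvR s kk ii / kk : Nat) : Int) = ((pvR s kk ii / kk + 1 : Nat) : Int) from by push_cast; ring]
    · rw [if_neg (fun h => hm ((pvMatchIff s kk ii hkk hib).mp h))]
      rw [if_neg (by
        intro h
        exact hm (by exact_mod_cast h))]

-- ===== VERDICT (by name: the statement is the Claim_ definition above) =====
theorem find_tandem_repeats_spec : Claim_equal_find_tandem_repeats := by
  unfold Claim_equal_find_tandem_repeats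
  intro sequence min_len max_len _ hpre
  unfold Spec_find_tandem_repeats
  unfold find_tandem_repeats find_tandem_repeats_alt
  dsimp only
  by_cases hs : sequence.toList = []
  · rw [if_pos hs, if_pos hs]
  · rw [if_neg hs, if_neg hs]
    rcases hpre with h0 | h1 | h2
    · exact absurd (by rw [h0]; rfl) hs
    · rw [PySem.List.pyRange_one_eq_nil (by omega : max_len + 1 ≤ min_len)]
      rfl
    · apply PySem.List.foldl_congr_mem
      intro acc k hkmem
      have hk : 1 ≤ k := by
        have := PySem.List.mem_pyRange_one.mp hkmem
        omega
      exact pvPerK sequence.toList k hk acc
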